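-- pv_equiv track=rewrite | github.com/git44og/advent-of-code-2020 | 10/aoc.py | generate_pattern_options
-- ===== SOURCE A (Python) =====
-- def generate_pattern_options(base_pattern, extension_pattern):
-- 	if len(extension_pattern) == 0:
-- 		return [base_pattern]
-- 	sub_patterns = extend_pattern(base_pattern, extension_pattern[0])
-- 	result_patterns = []
-- 	for sub_pattern in sub_patterns:
-- 		result_patterns += generate_pattern_options(sub_pattern, extension_pattern[1:])
-- 	return result_patterns
--
-- def extend_pattern(source_pattern, extension):
-- 	if len(source_pattern) == 0:
-- 		return [[extension]]
-- 	result_patterns = [source_pattern.copy()+[extension]]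
-- 	if source_pattern[-1] + extension <= 3:
-- 		new_pattern = source_pattern.copy()
-- 		new_pattern[-1] = source_pattern[-1] + extension
-- 		result_patterns.append(new_pattern)
-- 	return result_patterns
-- ===== SOURCE B (Python) =====
-- def generate_pattern_options(base_pattern, extension_pattern):
-- 	current = [base_pattern]
-- 	for ext in extension_pattern:
-- 		current = [p2 for p in current for p2 in extend_pattern(p, ext)]
-- 	return current
--
-- def extend_pattern(source_pattern, extension):
-- 	if len(source_pattern) == 0:
-- 		return [[extension]]
-- 	result_patterns = [source_pattern.copy()+[extension]]
-- 	if source_pattern[-1] + extension <= 3: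
-- 		new_pattern = source_pattern.copy()
-- 		new_pattern[-1] = source_pattern[-1] + extension
-- 		result_patterns.append(new_pattern)
-- 	return result_patterns
-- ===== Notes on version B (the rewrite author's own statement) =====
-- stated objective: simpler
-- what changed: Replaces the recursive DFS (recurse on the tail for every sub-pattern) with a single iterative fold: keep a worklist of patterns and, for each extension in order, expand every pattern via extend_pattern in one flat comprehension.
import Mathlib
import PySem

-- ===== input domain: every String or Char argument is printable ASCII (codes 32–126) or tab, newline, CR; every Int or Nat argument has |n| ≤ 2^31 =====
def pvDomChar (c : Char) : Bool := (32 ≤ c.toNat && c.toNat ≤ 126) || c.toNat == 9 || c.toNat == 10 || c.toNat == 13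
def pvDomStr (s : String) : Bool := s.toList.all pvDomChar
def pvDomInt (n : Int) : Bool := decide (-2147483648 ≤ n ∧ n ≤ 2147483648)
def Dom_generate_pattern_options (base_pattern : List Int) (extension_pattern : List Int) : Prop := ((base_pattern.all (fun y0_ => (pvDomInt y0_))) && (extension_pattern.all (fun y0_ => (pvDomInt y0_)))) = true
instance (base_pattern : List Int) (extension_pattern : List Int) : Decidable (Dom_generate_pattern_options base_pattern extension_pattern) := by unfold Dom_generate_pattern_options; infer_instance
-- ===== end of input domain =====

-- B replaces A's DFS recursion with an iterative fold over extension_pattern (simpler decomposition, same output order).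

-- ===== PORT A =====
-- shared helper: extend_pattern (identical in Source A and Source B)
def extend_pattern (source_pattern : List Int) (extension : Int) : List (List Int) :=
  if source_pattern.length = 0 then [[extension]]
  else
    let last := (PySem.List.pyGet? source_pattern (-1)).getD 0   -- source_pattern[-1]; in-range since nonempty
    let result_patterns := [source_pattern ++ [extension]]
    if last + extension ≤ 3 then
      result_patterns ++ [source_pattern.dropLast ++ [last + extension]]  -- new_pattern[-1] = last+extension
    else result_patterns

def generate_pattern_options (base_pattern : List Int) (extension_pattern : List Int) : List (List Int) :=
  match extension_pattern with
  | [] => [base_pattern]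
  | e :: rest =>
    (extend_pattern base_pattern e).foldl
      (fun result_patterns sub_pattern => result_patterns ++ generate_pattern_options sub_pattern rest) []

-- ===== PORT B =====
def generate_pattern_options_alt (base_pattern : List Int) (extension_pattern : List Int) : List (List Int) :=
  extension_pattern.foldl (fun current ext => current.flatMap (fun p => extend_pattern p ext)) [base_pattern]

-- ===== PRECONDITION & SPEC =====
def Spec_generate_pattern_options (base_pattern : List Int) (extension_pattern : List Int) (out : List (List Int)) : Prop := out = generate_pattern_options_alt base_pattern extension_pattern
instance (base_pattern : List Int) (extension_pattern : List Int) (out : List (List Int)) : Decidable (Spec_generate_pattern_options base_pattern extension_pattern out) := by unfold Spec_generate_pattern_options; infer_instance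

-- ===== CLAIM (what is proved, stated in full; the proofs are below) =====
def Claim_equal_generate_pattern_options : Prop := ∀ (base_pattern : List Int) (extension_pattern : List Int), Dom_generate_pattern_options base_pattern extension_pattern → Spec_generate_pattern_options base_pattern extension_pattern (generate_pattern_options base_pattern extension_pattern)

-- ===== LEMMAS AND PROOFS =====
theorem gpo_cons (b : List Int) (e : Int) (rest : List Int) :
    generate_pattern_options b (e :: rest)
      = (extend_pattern b e).flatMap (fun s => generate_pattern_options s rest) := by
  rw [generate_pattern_options]
  exact PySem.List.foldl_append_eq_flatMap _ _ _

theorem alt_fold_flatMap (exts : List Int) (acc : List (List Int)) :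
    exts.foldl (fun current ext => current.flatMap (fun p => extend_pattern p ext)) acc
      = acc.flatMap (fun p => generate_pattern_options p exts) := by
  induction exts generalizing acc with
  | nil => simp [generate_pattern_options]
  | cons e rest ih =>
    simp only [List.foldl_cons, ih, List.flatMap_assoc]
    congr 1
    funext p
    rw [gpo_cons]

-- ===== VERDICT (by name: the statement is the Claim_ definition above) =====
theorem generate_pattern_options_spec : Claim_equal_generate_pattern_options := by
  intro b exts _
  unfold Spec_generate_pattern_options generate_pattern_options_alt
  rw [alt_fold_flatMap]
  simp
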